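-- pv_equiv track=rewrite | github.com/hoangvietcoder/Discrete-Structures | LAB5_6/51900847_MaiHoangViet_Lab6.py | print2Prime
-- ===== SOURCE A (Python) =====
-- def print2Prime(a, b):
--     temp_1 = []
--     temp_2 = []
--     temp_3 = []
--     for i in range(a + 1, b + 1):
--         if i > 1:
--             for j in range(2, i):
--                 if i % j == 0:
--                     break
--             else:
--                 temp_1.append(i)
--     for i in temp_1:
--         for j in temp_1:
--             if i != j:
--                 c = i * j
--                 if a < c < b:
--                     temp_2.append([i, j])
--     for i in temp_2:
--         if len(temp_3) < 1:
--             temp_3.append(i)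
--         else:
--             if i not in temp_3:
--                 temp_3.append(i)
--             for j in temp_3:
--                 if i[0] == j[1] and i[1] == j[0]:
--                     temp_3.remove(i)
--     return temp_3
-- ===== SOURCE B (Python) =====
-- def print2Prime(a, b):
--     primes = []
--     for n in range(max(a + 1, 2), b + 1):
--         d = 2
--         is_p = True
--         while d * d <= n:
--             if n % d == 0:
--                 is_p = False
--                 break
--             d += 1
--         if is_p:
--             primes.append(n)
--     out = []
--     rest = primes
--     while rest:
--         p = rest[0]
--         rest = rest[1:]
--         for q in rest:
--             c = p * q
--             if c >= b:
--                 break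
--             if a < c:
--                 out.append([p, q])
--     return out
-- ===== Notes on version B (the rewrite author's own statement) =====
-- stated objective: alternative
-- what changed: Primality by trial division only up to sqrt(n) (instead of all of 2..n-1), and pairs enumerated once over strict suffixes of the ascending prime list with a monotone early break, eliminating A's full p*q cross product and its quadratic reverse-pair deduplication scan.
import Mathlib
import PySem

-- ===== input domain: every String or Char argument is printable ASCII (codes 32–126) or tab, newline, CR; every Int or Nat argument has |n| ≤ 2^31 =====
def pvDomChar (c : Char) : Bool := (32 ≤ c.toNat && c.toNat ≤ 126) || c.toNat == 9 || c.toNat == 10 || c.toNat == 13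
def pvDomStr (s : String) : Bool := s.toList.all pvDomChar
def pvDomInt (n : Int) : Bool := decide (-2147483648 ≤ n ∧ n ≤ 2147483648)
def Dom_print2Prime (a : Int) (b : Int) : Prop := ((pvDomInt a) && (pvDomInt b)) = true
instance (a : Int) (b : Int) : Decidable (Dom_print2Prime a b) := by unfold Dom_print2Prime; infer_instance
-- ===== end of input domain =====

-- B replaces A's full trial division by trial division up to sqrt(n) and enumerates each
-- unordered pair once (p before q in the ascending prime list), removing A's cross-product
-- plus reverse-pair-deduplication pass; proved to return the same list.

-- ===== PORT A =====
-- for j in range(2, i): if i % j == 0: break / else: append  (all = the for-else)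
def pvA_isPrimeTest (i : Int) : Bool :=
  (PySem.List.pyRange 2 i 1).all (fun j => !(PySem.Int.mod i j == 0))

def pvA_temp1 (a b : Int) : List Int :=
  (PySem.List.pyRange (a+1) (b+1) 1).foldl
    (fun acc i => if 1 < i then (if pvA_isPrimeTest i then acc ++ [i] else acc) else acc) []

def pvA_temp2 (a b : Int) (t1 : List Int) : List (List Int) :=
  t1.foldl (fun acc i =>
    t1.foldl (fun acc2 j =>
      if i ≠ j then (if a < i*j ∧ i*j < b then acc2 ++ [[i, j]] else acc2) else acc2) acc) []

-- i[0] == j[1] and i[1] == j[0]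
def pvA_match (x j : List Int) : Bool :=
  (PySem.List.pyGet? x 0 == PySem.List.pyGet? j 1) && (PySem.List.pyGet? x 1 == PySem.List.pyGet? j 0)

-- 'for j in temp_3: … temp_3.remove(i)' — index-based iteration over the list being mutated.
-- temp_3.remove(i) never raises here (i was just appended / membership-checked), so .getD t is exact.
-- fuel (initially the list length, which only shrinks) is a totality guard only: it never runs out.
def pvA_removeLoop (x : List Int) : Nat → List (List Int) → Nat → List (List Int)
  | 0, t, _ => t
  | fuel+1, t, k =>
      if h : k < t.length then
        pvA_removeLoop x fuel (if pvA_match x t[k] then (PySem.List.remove? t x).getD t else t) (k+1)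
      else t

def pvA_dedupStep (t3 : List (List Int)) (x : List Int) : List (List Int) :=
  if t3.length < 1 then t3 ++ [x]
  else
    (fun t => pvA_removeLoop x t.length t 0) (if t3.contains x then t3 else t3 ++ [x])

def print2Prime (a : Int) (b : Int) : List (List Int) :=
  (pvA_temp2 a b (pvA_temp1 a b)).foldl pvA_dedupStep []

-- ===== PORT B =====
-- while d * d <= n: if n % d == 0: not prime; d += 1
-- fuel (n+1 on the first call) is a totality guard only: d*d <= n forces d <= n, so it never runs out.
def pvB_divLoop (n : Int) : Nat → Nat → Bool
  | 0, _ => true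
  | fuel+1, d =>
      if (d : Int) * (d : Int) ≤ n then
        if PySem.Int.mod n (d : Int) == 0 then false else pvB_divLoop n fuel (d+1)
      else true

def pvB_primes (a b : Int) : List Int :=
  (PySem.List.pyRange (max (a+1) 2) (b+1) 1).foldl
    (fun acc n => if pvB_divLoop n (n.toNat + 1) 2 then acc ++ [n] else acc) []

-- for q in rest: c = p*q; if c >= b: break; if a < c: append
def pvB_inner (a b p : Int) (out : List (List Int)) : List Int → List (List Int)
  | [] => out
  | q :: rest =>
      if b ≤ p*q then out
      else pvB_inner a b p (if a < p*q then out ++ [[p, q]] else out) rest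

-- while rest: p = rest[0]; rest = rest[1:]; inner loop over rest
def pvB_pairLoop (a b : Int) (out : List (List Int)) (rest : List Int) : List (List Int) :=
  match rest with
  | [] => out
  | p :: rest' => pvB_pairLoop a b (pvB_inner a b p out rest') rest'

def print2Prime_alt (a : Int) (b : Int) : List (List Int) :=
  pvB_pairLoop a b [] (pvB_primes a b)

-- ===== PRECONDITION & SPEC =====
def Spec_print2Prime (a : Int) (b : Int) (out : List (List Int)) : Prop := out = print2Prime_alt a b
instance (a : Int) (b : Int) (out : List (List Int)) : Decidable (Spec_print2Prime a b out) := by unfold Spec_print2Prime; infer_instance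

-- ===== CLAIM (what is proved, stated in full; the proofs are below) =====
def Claim_equal_print2Prime : Prop := ∀ (a : Int) (b : Int), Dom_print2Prime a b → Spec_print2Prime a b (print2Prime a b)

-- ===== LEMMAS AND PROOFS =====

-- A's for-else trial division over all of [2, n) decides primality
theorem pvA_prime (n : Nat) (h : 2 ≤ n) : pvA_isPrimeTest (n : Int) = true ↔ n.Prime := by
  rw [Nat.prime_def_lt']
  unfold pvA_isPrimeTest
  rw [List.all_eq_true]
  constructor
  · intro hall
    refine ⟨h, fun m h2 hlt hdvd => ?_⟩
    have hm : (m : Int) ∈ PySem.List.pyRange 2 n 1 := by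
      rw [PySem.List.mem_pyRange_one]; omega
    have := hall _ hm
    simp only [Bool.not_eq_eq_eq_not, Bool.not_true, beq_eq_false_iff_ne] at this
    exact this ((PySem.Int.mod_eq_zero_iff_dvd (n : Int) (m : Int)).mpr (Int.natCast_dvd_natCast.mpr hdvd))
  · rintro ⟨-, hnd⟩ j hj
    rw [PySem.List.mem_pyRange_one] at hj
    simp only [Bool.not_eq_eq_eq_not, Bool.not_true, beq_eq_false_iff_ne]
    intro hz
    have hdvd : j ∣ (n : Int) := (PySem.Int.mod_eq_zero_iff_dvd _ _).mp hz
    have hj0 : 0 ≤ j := by omega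
    have : j.toNat ∣ n := by
      rw [← Int.natCast_dvd_natCast]
      simpa [Int.toNat_of_nonneg hj0] using hdvd
    exact hnd j.toNat (by omega) (by omega) this

-- B's while-loop tests exactly the divisors m ≥ d with m*m ≤ n (fuel never runs out)
theorem pvB_divLoop_iff (n : Int) :
    ∀ (fuel d : Nat), 2 ≤ d → n.toNat + 1 - d ≤ fuel →
    (pvB_divLoop n fuel d = true ↔ ∀ m : Nat, d ≤ m → (m : Int) * m ≤ n → ¬ ((m : Int) ∣ n)) := by
  intro fuel
  induction fuel with
  | zero =>
      intro d hd hf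
      refine iff_of_true rfl ?_
      intro m hm hmm hdvd
      have hm1 : (1 : Int) ≤ (m : Int) := by exact_mod_cast (by omega : 1 ≤ m)
      have h1 : (m : Int) ≤ (m : Int) * (m : Int) := le_mul_of_one_le_left (by omega) hm1
      have h2 : (n.toNat : Int) < (d : Int) := by exact_mod_cast (by omega : n.toNat < d)
      have h3 : (d : Int) ≤ (m : Int) := by exact_mod_cast hm
      have h4 : n ≤ (n.toNat : Int) := Int.self_le_toNat n
      linarith
  | succ fuel ih =>
      intro d hd hf
      rw [show pvB_divLoop n (fuel+1) d
            = (if (d : Int) * (d : Int) ≤ n then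
                (if PySem.Int.mod n (d : Int) == 0 then false else pvB_divLoop n fuel (d+1))
               else true) from rfl]
      by_cases hle : (d : Int) * (d : Int) ≤ n
      · rw [if_pos hle]
        by_cases hz : (PySem.Int.mod n (d : Int) == 0) = true
        · rw [if_pos hz]
          have hdvd : ((d : Nat) : Int) ∣ n := (PySem.Int.mod_eq_zero_iff_dvd n d).mp (by simpa using hz)
          exact ⟨fun h => by simp at h, fun H => (H d (le_refl d) hle hdvd).elim⟩
        · rw [if_neg hz]
          have hdn : (d : Int) ≤ n := by
            have hd1 : (1 : Int) ≤ (d : Int) := by exact_mod_cast (by omega : 1 ≤ d)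
            have := le_mul_of_one_le_left (show (0:Int) ≤ d by omega) hd1
            linarith
          rw [ih (d+1) (by omega) (by omega)]
          constructor
          · intro H m hm hmm
            rcases Nat.eq_or_lt_of_le hm with rfl | hlt
            · intro hdvd
              exact hz (by simpa using (PySem.Int.mod_eq_zero_iff_dvd n d).mpr hdvd)
            · exact H m hlt hmm
          · intro H m hm hmm
            exact H m (by omega) hmm
      · rw [if_neg hle]
        refine iff_of_true rfl ?_
        intro m hm hmm
        exfalso
        apply hle
        calc (d : Int) * d ≤ (m : Int) * m := by
              have : (d : Int) ≤ m := by exact_mod_cast hm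
              nlinarith [Int.natCast_nonneg d]
          _ ≤ n := hmm

theorem pvB_prime (n : Nat) (h : 2 ≤ n) : pvB_divLoop (n : Int) ((n : Int).toNat + 1) 2 = true ↔ n.Prime := by
  rw [pvB_divLoop_iff (n : Int) ((n : Int).toNat + 1) 2 (le_refl 2) (by omega), Nat.prime_def_le_sqrt]
  constructor
  · intro H
    refine ⟨h, fun m h2 hs => ?_⟩
    intro hdvd
    exact H m h2 (by exact_mod_cast Nat.le_sqrt.mp hs) (Int.natCast_dvd_natCast.mpr hdvd)
  · rintro ⟨-, H⟩ m hm hmm hdvd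
    exact H m hm (Nat.le_sqrt.mpr (by exact_mod_cast hmm)) (Int.natCast_dvd_natCast.mp hdvd)

theorem tests_eq (i : Int) (h : 2 ≤ i) : pvA_isPrimeTest i = pvB_divLoop i (i.toNat + 1) 2 := by
  have hi : i = ((i.toNat : Nat) : Int) := by omega
  have h2 : 2 ≤ i.toNat := by omega
  rw [hi]
  rw [Bool.eq_iff_iff, pvA_prime i.toNat h2, pvB_prime i.toNat h2]

theorem temp1_eq (a b : Int) : pvA_temp1 a b = pvB_primes a b := by
  unfold pvA_temp1 pvB_primes
  have hstep : ∀ (acc : List Int) (i : Int),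
      (if 1 < i then (if pvA_isPrimeTest i then acc ++ [i] else acc) else acc)
        = (if (1 < i ∧ pvA_isPrimeTest i = true) then acc ++ [i] else acc) := by
    intro acc i; split_ifs <;> simp_all
  rw [PySem.List.foldl_congr_mem _ _ (fun acc i => if (1 < i ∧ pvA_isPrimeTest i = true) then acc ++ [i] else acc) _ (fun acc x _ => hstep acc x)]
  rw [PySem.List.foldl_append_ite_eq_filter, PySem.List.foldl_append_if_eq_filter]
  simp only [List.nil_append]
  have key : ∀ i : Int, 2 ≤ i → (decide (1 < i ∧ pvA_isPrimeTest i = true)) = pvB_divLoop i (i.toNat + 1) 2 := by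
    intro i hi
    rw [tests_eq i hi]
    have h1 : 1 < i := by omega
    cases hb : pvB_divLoop i (i.toNat + 1) 2 <;> simp [h1]
  rcases le_or_gt 2 (a+1) with h2 | h2
  · rw [max_eq_left h2]
    apply List.filter_congr
    intro i hi
    rw [PySem.List.mem_pyRange_one] at hi
    exact key i (by omega)
  · rw [max_eq_right (le_of_lt h2)]
    rcases le_or_gt 2 (b+1) with hb | hb
    · rw [PySem.List.pyRange_one_append (a+1) 2 (b+1) (by omega) hb, List.filter_append]
      have h1 : (PySem.List.pyRange (a+1) 2 1).filter (fun i => decide (1 < i ∧ pvA_isPrimeTest i = true)) = [] := by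
        rw [List.filter_eq_nil_iff]
        intro i hi
        rw [PySem.List.mem_pyRange_one] at hi
        simp [show ¬ (1:Int) < i by omega]
      rw [h1, List.nil_append]
      apply List.filter_congr
      intro i hi
      rw [PySem.List.mem_pyRange_one] at hi
      exact key i (by omega)
    · rw [PySem.List.pyRange_one_eq_nil (show (b+1) ≤ 2 by omega)]
      simp only [List.filter_nil]
      rw [List.filter_eq_nil_iff]
      intro i hi
      rw [PySem.List.mem_pyRange_one] at hi
      simp [show ¬ (1:Int) < i by omega]

-- the full inner-loop pair list of A for outer prime p, and the pairs B keeps (p < q)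
def pvBlock (a b : Int) (P : List Int) (p : Int) : List (List Int) :=
  (P.filter (fun q => decide (p ≠ q ∧ a < p*q ∧ p*q < b))).map (fun q => [p, q])

def pvKept (a b : Int) (P : List Int) (p : Int) : List (List Int) :=
  (P.filter (fun q => decide (p < q ∧ a < p*q ∧ p*q < b))).map (fun q => [p, q])

theorem temp2_eq_flatMap (a b : Int) (P : List Int) :
    pvA_temp2 a b P = P.flatMap (pvBlock a b P) := by
  unfold pvA_temp2
  have inner : ∀ (i : Int) (acc : List (List Int)),
      P.foldl (fun acc2 j => if i ≠ j then (if a < i*j ∧ i*j < b then acc2 ++ [[i, j]] else acc2) else acc2) acc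
        = acc ++ pvBlock a b P i := by
    intro i acc
    rw [PySem.List.foldl_congr_mem _ _
      (fun acc2 j => if (i ≠ j ∧ a < i*j ∧ i*j < b) then acc2 ++ [[i, j]] else acc2) _
      (fun acc2 j _ => by dsimp only; split_ifs <;> tauto)]
    exact PySem.List.foldl_append_ite (p := fun j => i ≠ j ∧ a < i*j ∧ i*j < b) (f := fun j => [i, j]) P acc
  rw [PySem.List.foldl_congr_mem _ _ (fun acc i => acc ++ pvBlock a b P i) _
      (fun acc x _ => inner x acc)]
  rw [PySem.List.foldl_append_eq_flatMap]
  simp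

theorem match_pair (p q r s : Int) : pvA_match [p, q] [r, s] = true ↔ (r = q ∧ s = p) := by
  simp [pvA_match, PySem.List.pyGet?, PySem.List.pyIdx?]
  tauto

theorem removeLoop_none (x : List Int) (t : List (List Int)) :
    ∀ (fuel k : Nat),
    (∀ j ∈ t.drop k, pvA_match x j = false) → pvA_removeLoop x fuel t k = t := by
  intro fuel
  induction fuel with
  | zero => intro k _; rfl
  | succ n ih =>
      intro k hm
      rw [show pvA_removeLoop x (n+1) t k
            = (if h : k < t.length then
                 pvA_removeLoop x n (if pvA_match x t[k] then (PySem.List.remove? t x).getD t else t) (k+1)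
               else t) from rfl]
      by_cases h : k < t.length
      · have hmk : pvA_match x t[k] = false := hm _ (by rw [List.drop_eq_getElem_cons h]; exact List.mem_cons_self)
        rw [dif_pos h, if_neg (by simp [hmk])]
        exact ih (k+1) (fun j hj => hm j (by rw [List.drop_eq_getElem_cons h]; exact List.mem_cons_of_mem _ hj))
      · rw [dif_neg h]

theorem removeLoop_hit (x : List Int) :
    ∀ (fuel : Nat) (t : List (List Int)) (k i : Nat),
    x ∉ t → pvA_match x x = false → k ≤ i → (hi : i < t.length) →
    pvA_match x t[i] = true →
    (∀ (j : Nat) (hj : j < t.length), j ≠ i → pvA_match x t[j] = false) →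
    t.length - k ≤ fuel → pvA_removeLoop x (fuel + 1) (t ++ [x]) k = t := by
  intro fuel
  induction fuel with
  | zero =>
      intro t k i hx hxx hki hi hmi hother hfuel
      -- fuel forces k = t.length - ... but k ≤ i < t.length and t.length - k ≤ 0 is impossible
      omega
  | succ n ih =>
      intro t k i hx hxx hki hi hmi hother hfuel
      have hk : k < t.length := lt_of_le_of_lt hki hi
      have hklen : k < (t ++ [x]).length := by simp; omega
      have hel : (t ++ [x])[k]'hklen = t[k] := List.getElem_append_left hk
      rw [show pvA_removeLoop x (n+1+1) (t ++ [x]) k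
            = (if h : k < (t ++ [x]).length then
                 pvA_removeLoop x (n+1)
                   (if pvA_match x (t ++ [x])[k] then (PySem.List.remove? (t ++ [x]) x).getD (t ++ [x]) else (t ++ [x])) (k+1)
               else (t ++ [x])) from rfl]
      rw [dif_pos hklen]
      by_cases hke : k = i
      · subst hke
        rw [if_pos (by rw [hel]; exact hmi)]
        have hxmem : x ∈ t ++ [x] := by simp
        rw [PySem.List.remove?_eq_some_erase _ x hxmem]
        have herase : (t ++ [x]).erase x = t := by
          rw [List.erase_append_right [x] hx]
          simp
        rw [herase]
        simp only [Option.getD_some]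
        apply removeLoop_none x t (n+1) (k+1)
        intro j hj
        obtain ⟨m, hm, rfl⟩ := List.mem_iff_getElem.mp hj
        rw [List.length_drop] at hm
        rw [List.getElem_drop]
        exact hother _ (by omega) (by omega)
      · have hkne : pvA_match x t[k] = false := hother k hk hke
        rw [if_neg (by rw [hel]; simp [hkne])]
        exact ih t (k+1) i hx hxx (by omega) hi hmi hother (by omega)

theorem dedup_block (p : Int) :
    ∀ (qs : List Int) (acc : List (List Int)),
    (∀ x ∈ acc, ∃ r s : Int, x = [r, s] ∧ r < s) →
    acc.Nodup → qs.Nodup →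
    (∀ q ∈ qs, [p, q] ∉ acc) →
    (∀ q ∈ qs, q < p → [q, p] ∈ acc) →
    (∀ q ∈ qs, p ≠ q) →
    List.foldl pvA_dedupStep acc (qs.map (fun q => [p, q]))
      = acc ++ (qs.filter (fun q => decide (p < q))).map (fun q => [p, q]) := by
  intro qs
  induction qs with
  | nil => intro acc _ _ _ _ _ _; simp
  | cons q qs ih =>
      intro acc hsh hnd hqnd hnew hrev hne
      have hpq : p ≠ q := hne q List.mem_cons_self
      have hxacc : [p, q] ∉ acc := hnew q List.mem_cons_self
      have hxx : pvA_match [p, q] [p, q] = false := by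
        rw [Bool.eq_false_iff]
        intro hc
        exact hpq ((match_pair p q p q).mp hc).1
      have hcont : acc.contains [p, q] = false := by
        rw [Bool.eq_false_iff]
        intro hc
        exact hxacc (List.contains_iff_mem.mp hc)
      rcases lt_or_gt_of_ne hpq with hlt | hgt
      · -- p < q : the pair survives A's dedup pass
        have hstep : pvA_dedupStep acc [p, q] = acc ++ [[p, q]] := by
          have hnomatch : ∀ j ∈ acc ++ [[p, q]], pvA_match [p, q] j = false := by
            intro j hj
            rcases List.mem_append.mp hj with hja | hjx
            · obtain ⟨r, s, rfl, hrs⟩ := hsh j hja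
              rw [Bool.eq_false_iff]
              intro hc
              obtain ⟨hr, hs⟩ := (match_pair p q r s).mp hc
              omega
            · rw [List.mem_singleton] at hjx
              subst hjx
              exact hxx
          unfold pvA_dedupStep
          by_cases hlen : acc.length < 1
          · rw [if_pos hlen]
          · rw [if_neg hlen]
            simp only [hcont, Bool.false_eq_true, if_false]
            exact removeLoop_none _ _ (acc ++ [[p, q]]).length 0 (by simpa using hnomatch)
        rw [List.map_cons, List.foldl_cons, hstep]
        rw [ih (acc ++ [[p, q]]) ?_ ?_ ?_ ?_ ?_ ?_]
        · rw [List.filter_cons, if_pos (by simpa using hlt)]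
          simp
        · intro x hx
          rcases List.mem_append.mp hx with hxa | hxs
          · exact hsh x hxa
          · rw [List.mem_singleton] at hxs
            exact ⟨p, q, hxs, hlt⟩
        · rw [List.nodup_append']
          refine ⟨hnd, by simp, by simpa [List.disjoint_singleton]⟩
        · exact (List.nodup_cons.mp hqnd).2
        · intro q' hq'
          rw [List.mem_append, List.mem_singleton]
          rintro (hin | heq)
          · exact hnew q' (List.mem_cons_of_mem _ hq') hin
          · have : q' ≠ q := fun h => (List.nodup_cons.mp hqnd).1 (h ▸ hq')
            exact this (by simpa using heq)
        · intro q' hq' hlt'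
          exact List.mem_append_left _ (hrev q' (List.mem_cons_of_mem _ hq') hlt')
        · exact fun q' hq' => hne q' (List.mem_cons_of_mem _ hq')
      · -- q < p : A appends the pair and immediately removes it again
        have hqpin : [q, p] ∈ acc := hrev q List.mem_cons_self hgt
        have hlen : ¬ acc.length < 1 := by
          intro hl
          rw [Nat.lt_one_iff, List.length_eq_zero_iff] at hl
          subst hl
          simp at hqpin
        have hstep : pvA_dedupStep acc [p, q] = acc := by
          unfold pvA_dedupStep
          rw [if_neg hlen]
          simp only [hcont, Bool.false_eq_true, if_false]
          obtain ⟨i, hi, hieq⟩ := List.mem_iff_getElem.mp hqpin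
          rw [show (acc ++ [[p, q]]).length = acc.length + 1 by simp]
          refine removeLoop_hit [p, q] acc.length acc 0 i hxacc hxx (Nat.zero_le i) hi ?_ ?_ (by omega)
          · rw [hieq]
            exact (match_pair p q q p).mpr ⟨rfl, rfl⟩
          · intro j hj hjne
            rw [Bool.eq_false_iff]
            intro hc
            obtain ⟨r, s, hjeq, hrs⟩ := hsh acc[j] (List.getElem_mem hj)
            rw [hjeq] at hc
            obtain ⟨hr, hs⟩ := (match_pair p q r s).mp hc
            have : acc[j] = acc[i] := by rw [hjeq, hieq, hr, hs]
            exact hjne ((List.Nodup.getElem_inj_iff hnd).mp this)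
        rw [List.map_cons, List.foldl_cons, hstep]
        rw [ih acc hsh hnd (List.nodup_cons.mp hqnd).2
            (fun q' hq' => hnew q' (List.mem_cons_of_mem _ hq'))
            (fun q' hq' => hrev q' (List.mem_cons_of_mem _ hq'))
            (fun q' hq' => hne q' (List.mem_cons_of_mem _ hq'))]
        rw [List.filter_cons, if_neg (by simp; omega)]

theorem kept_flatMap_nodup (a b : Int) (Pfull : List Int) (hPnd : Pfull.Nodup) :
    ∀ P1 : List Int, P1.Nodup → (P1.flatMap (pvKept a b Pfull)).Nodup := by
  intro P1
  induction P1 with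
  | nil => simp
  | cons r P1 ih =>
      intro hnd
      rw [List.flatMap_cons, List.nodup_append']
      refine ⟨?_, ih (List.nodup_cons.mp hnd).2, ?_⟩
      · exact List.Nodup.map (fun x y h => by simpa using h) (hPnd.filter _)
      · intro x hx1 hx2
        obtain ⟨s, hs, rfl⟩ := List.mem_map.mp hx1
        obtain ⟨r', hr', hx2'⟩ := List.mem_flatMap.mp hx2
        obtain ⟨s', hs', heq⟩ := List.mem_map.mp hx2'
        have : r' = r := by simpa using congrArg (fun l => l.headI) heq
        exact (List.nodup_cons.mp hnd).1 (this ▸ hr')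

theorem dedup_all (a b : Int) (Pfull : List Int) (hs : Pfull.Pairwise (· < ·)) :
    ∀ (P2 P1 : List Int), Pfull = P1 ++ P2 →
    List.foldl pvA_dedupStep (P1.flatMap (pvKept a b Pfull)) (P2.flatMap (pvBlock a b Pfull))
      = (P1 ++ P2).flatMap (pvKept a b Pfull) := by
  have hnodup : Pfull.Nodup := hs.imp (fun h => ne_of_lt h)
  intro P2
  induction P2 with
  | nil => intro P1 _; simp
  | cons p P2 ih =>
      intro P1 hfull
      have hP1lt : ∀ r ∈ P1, r < p := by
        rw [hfull, List.pairwise_append] at hs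
        exact fun r hr => hs.2.2 r hr p List.mem_cons_self
      have hP2gt : ∀ s ∈ P2, p < s := by
        rw [hfull, List.pairwise_append] at hs
        exact (List.pairwise_cons.mp hs.2.1).1
      have hpnotP1 : p ∉ P1 := fun hp => lt_irrefl p (hP1lt p hp)
      have hpPfull : p ∈ Pfull := by rw [hfull]; simp
      rw [List.flatMap_cons, List.foldl_append]
      rw [show pvBlock a b Pfull p
            = (Pfull.filter (fun q => decide (p ≠ q ∧ a < p*q ∧ p*q < b))).map (fun q => [p, q]) from rfl]
      rw [dedup_block p _ _ ?_ ?_ ?_ ?_ ?_ ?_]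
      · have hkept : ((Pfull.filter (fun q => decide (p ≠ q ∧ a < p*q ∧ p*q < b))).filter
            (fun q => decide (p < q))).map (fun q => [p, q]) = pvKept a b Pfull p := by
          unfold pvKept
          rw [List.filter_filter]
          congr 1
          apply List.filter_congr
          intro q _
          by_cases h1 : p < q <;> by_cases h2 : a < p*q ∧ p*q < b <;>
            simp [h1, h2, ne_of_lt]
        rw [hkept]
        have hT : P1.flatMap (pvKept a b Pfull) ++ pvKept a b Pfull p
            = (P1 ++ [p]).flatMap (pvKept a b Pfull) := by simp
        rw [hT, ih (P1 ++ [p]) (by rw [hfull]; simp)]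
        simp
      · -- shapes in the accumulator: kept pairs [r, s] with r < s
        intro x hx
        obtain ⟨r, hr, hx'⟩ := List.mem_flatMap.mp hx
        obtain ⟨s, hs', rfl⟩ := List.mem_map.mp hx'
        have := List.of_mem_filter hs'
        simp only [decide_eq_true_eq] at this
        exact ⟨r, s, rfl, this.1⟩
      · exact kept_flatMap_nodup a b Pfull hnodup P1
          (List.Nodup.sublist (List.sublist_append_left P1 (p :: P2)) (hfull ▸ hnodup))
      · exact hnodup.filter _
      · intro q hq hin
        obtain ⟨r, hr, hx'⟩ := List.mem_flatMap.mp hin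
        obtain ⟨s, hs', heq⟩ := List.mem_map.mp hx'
        have : r = p := by simpa using congrArg (fun l => l.headI) heq
        exact hpnotP1 (this ▸ hr)
      · intro q hq hqp
        have hqmem : q ∈ Pfull := List.mem_of_mem_filter hq
        have hcond := (by simpa using List.of_mem_filter hq : p ≠ q ∧ a < p*q ∧ p*q < b)
        have hqP1 : q ∈ P1 := by
          rw [hfull] at hqmem
          rcases List.mem_append.mp hqmem with h | h
          · exact h
          · rcases List.mem_cons.mp h with rfl | h
            · omega
            · exact absurd (hP2gt q h) (by omega)
        refine List.mem_flatMap.mpr ⟨q, hqP1, List.mem_map.mpr ⟨p, ?_, rfl⟩⟩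
        refine List.mem_filter.mpr ⟨hpPfull, ?_⟩
        have : a < q*p ∧ q*p < b := by constructor <;> [linarith [hcond.2.1, mul_comm p q]; linarith [hcond.2.2, mul_comm p q]]
        simp [hqp, this.1, this.2]
      · intro q hq
        exact (by simpa using List.of_mem_filter hq : p ≠ q ∧ _).1

theorem kept_eq_suffix (a b : Int) (P1 P2 : List Int) (p : Int)
    (hs : (P1 ++ p :: P2).Pairwise (· < ·)) :
    pvKept a b (P1 ++ p :: P2) p = (P2.filter (fun q => decide (a < p*q ∧ p*q < b))).map (fun q => [p, q]) := by
  unfold pvKept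
  rw [List.pairwise_append] at hs
  have hP1 : ∀ r ∈ P1, r < p := fun r hr => hs.2.2 r hr p List.mem_cons_self
  have hP2 : ∀ s ∈ P2, p < s := (List.pairwise_cons.mp hs.2.1).1
  rw [List.filter_append, List.filter_cons]
  have h1 : P1.filter (fun q => decide (p < q ∧ a < p*q ∧ p*q < b)) = [] := by
    rw [List.filter_eq_nil_iff]
    intro q hq
    have := hP1 q hq
    simp
    intro h
    omega
  rw [h1, if_neg (by simp), List.nil_append]
  congr 1
  apply List.filter_congr
  intro q hq
  have := hP2 q hq
  by_cases h2 : a < p*q ∧ p*q < b <;> simp [h2, this]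

-- B's inner loop with its monotone early break is the filter (rest is ascending, p > 0)
theorem inner_eq (a b p : Int) (hp : 0 < p) :
    ∀ (qs : List Int) (out : List (List Int)), qs.Pairwise (· < ·) →
    pvB_inner a b p out qs
      = out ++ (qs.filter (fun q => decide (a < p*q ∧ p*q < b))).map (fun q => [p, q]) := by
  intro qs
  induction qs with
  | nil => intro out _; simp [pvB_inner]
  | cons q rest ih =>
      intro out hs
      rw [show pvB_inner a b p out (q :: rest)
            = (if b ≤ p*q then out else pvB_inner a b p (if a < p*q then out ++ [[p, q]] else out) rest) from rfl]
      by_cases hb : b ≤ p*q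
      · rw [if_pos hb]
        have hnil : (q :: rest).filter (fun q => decide (a < p*q ∧ p*q < b)) = [] := by
          rw [List.filter_eq_nil_iff]
          intro x hx
          have hqx : q ≤ x := by
            rcases List.mem_cons.mp hx with rfl | h
            · exact le_refl x
            · exact le_of_lt ((List.pairwise_cons.mp hs).1 x h)
          have hmono : p*q ≤ p*x := mul_le_mul_of_nonneg_left hqx (le_of_lt hp)
          simp only [decide_eq_true_eq, not_and]
          intro _
          omega
        rw [hnil]
        simp
      · rw [if_neg hb, ih _ (List.pairwise_cons.mp hs).2, List.filter_cons]
        by_cases ha : a < p*q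
        · rw [if_pos ha, if_pos (by simp only [decide_eq_true_eq]; omega)]
          simp
        · rw [if_neg ha, if_neg (by simp only [decide_eq_true_eq]; omega)]

theorem pairLoop_go (a b : Int) (Pfull : List Int) (hs : Pfull.Pairwise (· < ·))
    (hpos : ∀ x ∈ Pfull, 0 < x) :
    ∀ (P2 P1 : List Int) (out : List (List Int)), Pfull = P1 ++ P2 →
    pvB_pairLoop a b out P2 = out ++ P2.flatMap (pvKept a b Pfull) := by
  intro P2
  induction P2 with
  | nil => intro P1 out _; rw [pvB_pairLoop]; simp
  | cons p P2 ih =>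
      intro P1 out hfull
      have hrest : P2.Pairwise (· < ·) := by
        rw [hfull, List.pairwise_append] at hs
        exact (List.pairwise_cons.mp hs.2.1).2
      have hp : 0 < p := hpos p (by rw [hfull]; simp)
      rw [pvB_pairLoop]
      rw [inner_eq a b p hp P2 out hrest]
      rw [ih (P1 ++ [p]) _ (by rw [hfull]; simp)]
      rw [List.flatMap_cons]
      have hk : pvKept a b Pfull p = (P2.filter (fun q => decide (a < p*q ∧ p*q < b))).map (fun q => [p, q]) := by
        subst hfull
        exact kept_eq_suffix a b P1 P2 p hs
      rw [hk]
      simp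

theorem print2Prime_agree (a b : Int) : print2Prime a b = print2Prime_alt a b := by
  unfold print2Prime print2Prime_alt
  rw [temp1_eq]
  set P := pvB_primes a b with hP
  have hPform : P = (PySem.List.pyRange (max (a+1) 2) (b+1) 1).filter (fun n => pvB_divLoop n (n.toNat + 1) 2) := by
    rw [hP]; unfold pvB_primes
    rw [PySem.List.foldl_append_if_eq_filter]
    simp
  have hs : P.Pairwise (· < ·) := by
    rw [hPform]
    exact List.Pairwise.filter _ (PySem.List.pairwise_lt_pyRange_one _ _)
  have hpos : ∀ x ∈ P, 0 < x := by
    intro x hx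
    rw [hPform] at hx
    have := PySem.List.mem_pyRange_one.mp (List.mem_of_mem_filter hx)
    omega
  rw [temp2_eq_flatMap]
  have h1 := dedup_all a b P hs P [] rfl
  simp only [List.flatMap_nil, List.nil_append] at h1
  rw [h1]
  exact (pairLoop_go a b P hs hpos P [] [] rfl).symm

-- ===== VERDICT (by name: the statement is the Claim_ definition above) =====
theorem print2Prime_spec : Claim_equal_print2Prime := by
  intro a b _
  unfold Spec_print2Prime
  exact print2Prime_agree a b
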